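-- pv_equiv track=rewrite | github.com/yjiong/pydevdrive | device/ammeter/dlt645_07.py | h2bcd
-- ===== SOURCE A (Python) =====
-- def h2bcd(hexv):
--     if isinstance(hexv, list):
--         retval = 0
--         for h in hexv:
--             if isinstance(h, int):
--                 retval *= 100
--                 retval += (h >> 4) * 10 + (h & 0xf)
--             else:
--                 return 0
--         return retval
--     if isinstance(hexv, int):
--         return (hexv >> 4) * 10 + (hexv & 0xf)
--     return 0
-- ===== SOURCE B (Python) =====
-- def h2bcd(hexv):
--     if isinstance(hexv, list):
--         if not all(isinstance(h, int) for h in hexv):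
--             return 0
--         total = 0
--         mult = 1
--         for h in reversed(hexv):
--             total += ((h >> 4) * 10 + (h & 0xf)) * mult
--             mult *= 100
--         return total
--     if isinstance(hexv, int):
--         return (hexv >> 4) * 10 + (hexv & 0xf)
--     return 0
-- ===== Notes on version B (the rewrite author's own statement) =====
-- stated objective: alternative
-- what changed: Replaces the Horner-style accumulator (retval = retval*100 + digit, aborting mid-loop on a non-int) with an up-front type check followed by a place-value pass over the reversed list keeping a running power-of-100 multiplier.
import Mathlib
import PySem

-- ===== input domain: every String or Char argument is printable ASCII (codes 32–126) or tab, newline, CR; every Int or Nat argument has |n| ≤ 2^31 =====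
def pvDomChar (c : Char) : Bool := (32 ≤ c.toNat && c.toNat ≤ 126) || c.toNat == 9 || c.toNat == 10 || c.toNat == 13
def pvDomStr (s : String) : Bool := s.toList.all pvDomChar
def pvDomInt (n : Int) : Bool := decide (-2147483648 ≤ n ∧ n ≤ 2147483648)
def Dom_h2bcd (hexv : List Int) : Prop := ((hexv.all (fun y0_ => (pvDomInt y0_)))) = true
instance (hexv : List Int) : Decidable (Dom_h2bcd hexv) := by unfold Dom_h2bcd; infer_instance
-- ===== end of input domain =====

-- B replaces A's Horner accumulator with a reversed-list place-value pass (running *100 multiplier); alternative decomposition, same cost.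
-- ===== PORT A =====
-- BCD digit value of one byte: (h >> 4) * 10 + (h & 0xf)
def pvDigit (h : Int) : Int := (h >>> 4) * 10 + PySem.Int.band h 15

-- the 'for h in hexv' loop of A with accumulator retval (the non-int branch is dead over List Int)
def h2bcdGo (retval : Int) : List Int → Int
  | [] => retval
  | h :: t => h2bcdGo (retval * 100 + pvDigit h) t

def h2bcd (hexv : List Int) : Int := h2bcdGo 0 hexv

-- ===== PORT B =====
-- one step of B's loop over reversed(hexv): state (total, mult)
def pvStep (st : Int × Int) (h : Int) : Int × Int :=
  (st.1 + pvDigit h * st.2, st.2 * 100)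

def h2bcd_alt (hexv : List Int) : Int :=
  (hexv.reverse.foldl pvStep (0, 1)).1

-- ===== PRECONDITION & SPEC =====
def Spec_h2bcd (hexv : List Int) (out : Int) : Prop := out = h2bcd_alt hexv
instance (hexv : List Int) (out : Int) : Decidable (Spec_h2bcd hexv out) := by unfold Spec_h2bcd; infer_instance

-- ===== CLAIM (what is proved, stated in full; the proofs are below) =====
def Claim_equal_h2bcd : Prop := ∀ (hexv : List Int), Dom_h2bcd hexv → Spec_h2bcd hexv (h2bcd hexv)

-- ===== LEMMAS AND PROOFS =====

-- ===== VERDICT (by name: the statement is the Claim_ definition above) =====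
-- A's loop over an appended list runs the two parts in sequence
theorem h2bcdGo_append (xs ys : List Int) (acc : Int) :
    h2bcdGo acc (xs ++ ys) = h2bcdGo (h2bcdGo acc xs) ys := by
  induction xs generalizing acc with
  | nil => rfl
  | cons h t ih => simp [h2bcdGo, ih]

-- invariant of B's fold: it accumulates mult times the Horner value of the reversed input
theorem pvStep_foldl (l : List Int) (t m : Int) :
    l.foldl pvStep (t, m) = (t + m * h2bcdGo 0 l.reverse, m * 100 ^ l.length) := by
  induction l generalizing t m with
  | nil => simp [h2bcdGo]
  | cons h u ih =>
    simp only [List.foldl_cons, pvStep, ih, List.reverse_cons, h2bcdGo_append,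
      List.length_cons, Prod.mk.injEq]
    constructor
    · simp [h2bcdGo]; ring
    · ring

theorem h2bcd_spec : Claim_equal_h2bcd := by
  intro hexv _
  unfold Spec_h2bcd h2bcd h2bcd_alt
  rw [pvStep_foldl]
  simp
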